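-- pv_equiv track=rewrite | github.com/jdamerow/hello-world | temp_example_1_fixed.py | sort_temperatures
-- ===== SOURCE A (Python) =====
-- NORMAL_LOW = 97 # normal human body temperature lower end
--
-- NORMAL_HIGH = 99 # normal human body temperature higher end
--
-- def sort_temperatures (measurements):
--     low = []
--     normal = []
--     high = []
--
--     for temperature in measurements:
--         if temperature < NORMAL_LOW:
--             low.append(temperature)
--         elif temperature > NORMAL_HIGH:
--             high.append(temperature)
--         else:
--             normal.append(temperature)
--
--     return low, normal, high
-- ===== SOURCE B (Python) =====
-- NORMAL_LOW = 97
--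
-- NORMAL_HIGH = 99
--
-- def sort_temperatures(measurements):
--     # Stable sort by bucket key (0=low, 1=normal, 2=high), then cut the
--     # sorted list at the bucket boundaries.  Stability preserves the
--     # original relative order inside each bucket.
--     def bucket(t):
--         return 0 if t < NORMAL_LOW else (2 if t > NORMAL_HIGH else 1)
--     s = sorted(measurements, key=bucket)
--     i = sum(1 for t in s if bucket(t) == 0)
--     j = i + sum(1 for t in s if bucket(t) == 1)
--     return s[:i], s[i:j], s[j:]
-- ===== Notes on version B (the rewrite author's own statement) =====
-- stated objective: alternative
-- what changed: Instead of one accumulating pass with an elif chain, B stably sorts the list by a three-valued bucket key and then slices the sorted list at the bucket boundaries; stability of sorted() preserves the in-bucket order.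
import Mathlib
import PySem

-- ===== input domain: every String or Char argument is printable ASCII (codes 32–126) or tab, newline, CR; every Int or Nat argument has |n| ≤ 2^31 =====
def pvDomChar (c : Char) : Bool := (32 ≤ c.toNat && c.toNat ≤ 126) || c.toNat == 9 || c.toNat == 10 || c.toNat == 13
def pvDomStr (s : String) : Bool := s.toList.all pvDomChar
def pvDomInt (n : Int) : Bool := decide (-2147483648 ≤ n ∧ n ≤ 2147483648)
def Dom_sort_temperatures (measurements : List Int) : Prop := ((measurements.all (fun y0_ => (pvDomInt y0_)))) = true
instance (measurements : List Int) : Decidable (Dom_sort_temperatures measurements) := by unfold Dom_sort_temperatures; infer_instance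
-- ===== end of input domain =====

-- B replaces the accumulating bucketing loop by a stable sort on a three-valued
-- bucket key followed by slicing at the bucket boundaries (alternative algorithm).

-- ===== PORT A =====
-- literal port of A's loop: fold over measurements carrying the three accumulators
def sort_temperatures (measurements : List Int) : List Int × List Int × List Int :=
  let r := measurements.foldl
    (fun (acc : List Int × List Int × List Int) temperature =>
      let (low, normal, high) := acc
      if temperature < 97 then (low ++ [temperature], normal, high)
      else if temperature > 99 then (low, normal, high ++ [temperature])
      else (low, normal ++ [temperature], high))
    ([], [], [])
  r

-- ===== PORT B =====
-- the helper 'bucket' of Source B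
def pvBucket (t : Int) : Int := if t < 97 then 0 else if t > 99 then 2 else 1

-- port of Source B: stable sort by bucket key, then slice at the bucket boundaries.
-- sum(1 for t in s if P(t)) is ported as List.countP; the slices s[:i], s[i:j],
-- s[j:] with 0 ≤ i ≤ j ≤ len(s) are exactly take/drop as written here.
def sort_temperatures_alt (measurements : List Int) : List Int × List Int × List Int :=
  let s := PySem.List.sorted measurements pvBucket false
  let i := s.countP (fun t => pvBucket t == 0)
  let j := i + s.countP (fun t => pvBucket t == 1)
  (s.take i, (s.drop i).take (j - i), s.drop j)

-- ===== PRECONDITION & SPEC =====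
def Spec_sort_temperatures (measurements : List Int) (out : List Int × List Int × List Int) : Prop := out = sort_temperatures_alt measurements
instance (measurements : List Int) (out : List Int × List Int × List Int) : Decidable (Spec_sort_temperatures measurements out) := by unfold Spec_sort_temperatures; infer_instance

-- ===== CLAIM =====
def Claim_equal_sort_temperatures : Prop := ∀ (measurements : List Int), Dom_sort_temperatures measurements → Spec_sort_temperatures measurements (sort_temperatures measurements)

-- ===== LEMMAS AND PROOFS =====

-- insertBy passes over a prefix it is not inserted before
theorem insertBy_skip {α : Type} (before : α → α → Bool) (x : α) (P Q : List α)
    (h : ∀ y ∈ P, before x y = false) :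
    PySem.List.insertBy before x (P ++ Q) = P ++ PySem.List.insertBy before x Q := by
  induction P with
  | nil => simp
  | cons p ps ih =>
    have hp := h p (by simp)
    simp only [List.cons_append, PySem.List.insertBy, hp]
    simp only [Bool.false_eq_true, if_false]
    exact congrArg (p :: ·) (ih (fun y hy => h y (by simp [hy])))

-- insertBy goes to the very front when it precedes every element
theorem insertBy_front {α : Type} (before : α → α → Bool) (x : α) (Q : List α)
    (h : ∀ y ∈ Q, before x y = true) :
    PySem.List.insertBy before x Q = x :: Q := by
  cases Q with
  | nil => rfl
  | cons q qs => simp [PySem.List.insertBy, h q (by simp)]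

-- the three bucket filters of a list
def pvF (i : Int) (xs : List Int) : List Int := xs.filter (fun t => pvBucket t == i)

theorem pvBucket_mem (t : Int) : pvBucket t = 0 ∨ pvBucket t = 1 ∨ pvBucket t = 2 := by
  unfold pvBucket; split_ifs <;> simp

-- invariant of the insertion-sort fold: starting from three concatenated buckets,
-- it ends with each bucket extended by that bucket's filter of the remaining input
theorem foldl_insertBy_buckets (xs : List Int) :
    ∀ (A B C : List Int),
    (∀ a ∈ A, pvBucket a = 0) → (∀ b ∈ B, pvBucket b = 1) → (∀ c ∈ C, pvBucket c = 2) →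
    xs.foldl (fun acc x => PySem.List.insertBy (fun a b => decide (pvBucket a < pvBucket b)) x acc) (A ++ B ++ C)
      = (A ++ pvF 0 xs) ++ (B ++ pvF 1 xs) ++ (C ++ pvF 2 xs) := by
  induction xs with
  | nil => intro A B C _ _ _; simp [pvF]
  | cons x xs ih =>
    intro A B C hA hB hC
    simp only [List.foldl_cons]
    rcases pvBucket_mem x with hx | hx | hx
    · have step : PySem.List.insertBy (fun a b => decide (pvBucket a < pvBucket b)) x (A ++ B ++ C)
          = (A ++ [x]) ++ B ++ C := by
        rw [List.append_assoc, insertBy_skip _ _ A (B ++ C)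
          (by intro y hy; simp [hA y hy, hx]),
          insertBy_front _ _ (B ++ C) (by
            intro y hy; rcases List.mem_append.mp hy with h | h
            · simp [hB y h, hx]
            · simp [hC y h, hx])]
        simp
      rw [step, ih (A ++ [x]) B C
        (by intro a ha; rcases List.mem_append.mp ha with h | h
            · exact hA a h
            · simp at h; subst h; exact hx) hB hC]
      simp [pvF, hx]
    · have step : PySem.List.insertBy (fun a b => decide (pvBucket a < pvBucket b)) x (A ++ B ++ C)
          = A ++ (B ++ [x]) ++ C := by
        rw [List.append_assoc, insertBy_skip _ _ A (B ++ C)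
          (by intro y hy; simp [hA y hy, hx]),
          insertBy_skip _ _ B C (by intro y hy; simp [hB y hy, hx]),
          insertBy_front _ _ C (by intro y hy; simp [hC y hy, hx])]
        simp
      rw [step, ih A (B ++ [x]) C hA
        (by intro b hb; rcases List.mem_append.mp hb with h | h
            · exact hB b h
            · simp at h; subst h; exact hx) hC]
      simp [pvF, hx]
    · have step : PySem.List.insertBy (fun a b => decide (pvBucket a < pvBucket b)) x (A ++ B ++ C)
          = A ++ B ++ (C ++ [x]) := by
        rw [List.append_assoc, insertBy_skip _ _ A (B ++ C)
          (by intro y hy; simp [hA y hy, hx]),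
          insertBy_skip _ _ B C (by intro y hy; simp [hB y hy, hx]),
          PySem.List.insertBy_of_forall_not_before _ _ C (by intro y hy; simp [hC y hy, hx])]
        simp
      rw [step, ih A B (C ++ [x]) hA hB
        (by intro c hc; rcases List.mem_append.mp hc with h | h
            · exact hC c h
            · simp at h; subst h; exact hx)]
      simp [pvF, hx]

-- the stable sort by bucket key is the concatenation of the three bucket filters
theorem sorted_bucket_eq (xs : List Int) :
    PySem.List.sorted xs pvBucket false = pvF 0 xs ++ pvF 1 xs ++ pvF 2 xs := by
  rw [PySem.List.sorted_eq_foldl_insertBy]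
  simpa using foldl_insertBy_buckets xs [] [] [] (by simp) (by simp) (by simp)

theorem countP_pvF_self (i : Int) (xs : List Int) :
    (pvF i xs).countP (fun t => pvBucket t == i) = (pvF i xs).length := by
  apply List.countP_eq_length.mpr
  intro a ha
  exact (List.mem_filter.mp ha).2

theorem countP_pvF_ne (i j : Int) (h : i ≠ j) (xs : List Int) :
    (pvF i xs).countP (fun t => pvBucket t == j) = 0 := by
  apply List.countP_eq_zero.mpr
  intro a ha
  have := (List.mem_filter.mp ha).2
  simp at this ⊢
  omega

-- loop invariant for A's fold (from any starting accumulators)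
theorem sort_temperatures_fold_inv (measurements : List Int) (l0 n0 h0 : List Int) :
    measurements.foldl
      (fun (acc : List Int × List Int × List Int) temperature =>
        let (low, normal, high) := acc
        if temperature < 97 then (low ++ [temperature], normal, high)
        else if temperature > 99 then (low, normal, high ++ [temperature])
        else (low, normal ++ [temperature], high))
      (l0, n0, h0)
    = (l0 ++ measurements.filter (fun t => decide (t < 97)),
       n0 ++ measurements.filter (fun t => decide (97 ≤ t ∧ t ≤ 99)),
       h0 ++ measurements.filter (fun t => decide (t > 99))) := by
  induction measurements generalizing l0 n0 h0 with
  | nil => simp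
  | cons x xs ih =>
    simp only [List.foldl_cons, List.filter_cons]
    by_cases h1 : x < 97
    · have h2 : ¬ (97 ≤ x ∧ x ≤ 99) := by omega
      have h3 : ¬ (x > 99) := by omega
      simp [h1, h2, h3, ih]
    · by_cases h3 : x > 99
      · have h2 : ¬ (97 ≤ x ∧ x ≤ 99) := by omega
        simp [h1, h2, h3, ih]
      · have h2 : 97 ≤ x ∧ x ≤ 99 := by omega
        simp [h1, h2, h3, ih]

-- the bucket filters coincide with A's threshold filters
theorem pvF0_eq (xs : List Int) : pvF 0 xs = xs.filter (fun t => decide (t < 97)) := by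
  apply List.filter_congr
  intro t _
  by_cases h : t < 97 <;> simp [pvBucket, h] <;> omega

theorem pvF1_eq (xs : List Int) : pvF 1 xs = xs.filter (fun t => decide (97 ≤ t ∧ t ≤ 99)) := by
  apply List.filter_congr
  intro t _
  unfold pvBucket
  split_ifs with h1 h2 <;> simp <;> omega

theorem pvF2_eq (xs : List Int) : pvF 2 xs = xs.filter (fun t => decide (t > 99)) := by
  apply List.filter_congr
  intro t _
  unfold pvBucket
  split_ifs with h1 h2 <;> simp <;> omega

-- ===== VERDICT =====
theorem sort_temperatures_spec : Claim_equal_sort_temperatures := by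
  intro measurements _
  unfold Spec_sort_temperatures sort_temperatures sort_temperatures_alt
  simp only []
  rw [sort_temperatures_fold_inv, sorted_bucket_eq]
  have hc0 : (pvF 0 measurements ++ pvF 1 measurements ++ pvF 2 measurements).countP
      (fun t => pvBucket t == 0) = (pvF 0 measurements).length := by
    simp [List.countP_append, countP_pvF_self, countP_pvF_ne 1 0 (by decide),
      countP_pvF_ne 2 0 (by decide)]
  have hc1 : (pvF 0 measurements ++ pvF 1 measurements ++ pvF 2 measurements).countP
      (fun t => pvBucket t == 1) = (pvF 1 measurements).length := by
    simp [List.countP_append, countP_pvF_self, countP_pvF_ne 0 1 (by decide),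
      countP_pvF_ne 2 1 (by decide)]
  rw [hc0, hc1]
  refine Prod.ext ?_ (Prod.ext ?_ ?_)
  · -- take |f0| of f0 ++ (f1 ++ f2)
    rw [List.append_assoc]
    simpa [pvF0_eq] using (List.take_left (pvF 0 measurements) (pvF 1 measurements ++ pvF 2 measurements))
  · rw [List.append_assoc, List.drop_left]
    simpa [pvF1_eq] using (List.take_left (pvF 1 measurements) (pvF 2 measurements))
  · rw [show (pvF 0 measurements ++ pvF 1 measurements ++ pvF 2 measurements)
        = (pvF 0 measurements ++ pvF 1 measurements) ++ pvF 2 measurements by simp,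
      show (pvF 0 measurements).length + (pvF 1 measurements).length
        = (pvF 0 measurements ++ pvF 1 measurements).length by simp]
    simpa [pvF2_eq] using (List.drop_left (pvF 0 measurements ++ pvF 1 measurements) (pvF 2 measurements))
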